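-- pv_equiv track=rewrite | github.com/tomy0000000/online-judge | leetcode/1593-split-a-string-into-the-max-number-of-unique-substrings/expo.py | split_count
-- ===== SOURCE A (Python) =====
-- def split_count(s: str, flags: list[bool]) -> int:
--     split = set()
--     buf = ""
--     for c, flag in zip(s, flags):
--         buf += c
--         if flag:
--             if buf in split:
--                 return -1
--             split.add(buf)
--             buf = ""
--     return len(split)
-- ===== SOURCE B (Python) =====
-- def split_count(s: str, flags: list[bool]) -> int:
--     fl = flags[: len(s)]
--     pieces = []
--     start = 0
--     while True:
--         try:
--             k = fl.index(True, start)
--         except ValueError: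
--             break
--         pieces.append(s[start : k + 1])
--         start = k + 1
--     srt = sorted(pieces)
--     for x, y in zip(srt, srt[1:]):
--         if x == y:
--             return -1
--     return len(pieces)
-- ===== Notes on version B (the rewrite author's own statement) =====
-- stated objective: alternative
-- what changed: B replaces A's per-character buffer accumulation with incremental set membership by a cursor loop that jumps straight to the next True flag via fl.index(True, start) and slices each piece out of s, then detects duplicate pieces in a separate sort-then-adjacent-scan pass.
import Mathlib
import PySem

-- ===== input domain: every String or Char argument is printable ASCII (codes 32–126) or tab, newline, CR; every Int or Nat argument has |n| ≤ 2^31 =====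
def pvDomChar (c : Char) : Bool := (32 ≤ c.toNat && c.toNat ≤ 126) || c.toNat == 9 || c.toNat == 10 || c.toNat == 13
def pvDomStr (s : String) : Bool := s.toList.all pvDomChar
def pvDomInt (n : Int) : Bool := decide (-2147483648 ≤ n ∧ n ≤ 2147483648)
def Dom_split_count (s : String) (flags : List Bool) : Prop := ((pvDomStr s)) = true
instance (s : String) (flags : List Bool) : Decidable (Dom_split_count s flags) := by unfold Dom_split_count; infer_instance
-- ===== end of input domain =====

-- B replaces A's per-character buffer loop with in-loop set membership by a recursion
-- that jumps to the next True flag with flags.index(True) and slices the piece off,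
-- then detects duplicate pieces afterwards by sorting and scanning adjacent pairs.

-- ===== PORT A =====
-- loop over zip(s, flags): split is the Python set, buf the running buffer;
-- 'return -1' inside the loop becomes the -1 branch of the recursion
def splitALoop : List (Char × Bool) → PySem.Set String → String → Int
  | [], split, _ => (split.length : Int)
  | (c, flag) :: rest, split, buf =>
    let buf' := buf.push c
    if flag then
      if PySem.Set.contains split buf' then -1
      else splitALoop rest (PySem.Set.add split buf') ""
    else splitALoop rest split buf'

def split_count (s : String) (flags : List Bool) : Int :=
  splitALoop (s.toList.zip flags) PySem.Set.empty ""

-- ===== PORT B =====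
-- the 'while True: k = fl.index(True, start) ... start = k + 1' cursor loop, as a
-- recursion on the cursor; fl.index(True, start) is ported by hand as
-- start + (first index of true in fl.drop start) — exact: ValueError ↔ none
def piecesOfB (s : String) (fl : List Bool) (start : Nat) : List String :=
  match h : PySem.List.index? (fl.drop start) true with
  | none => []
  | some j =>
    PySem.Str.slice s (some (start : Nat)) (some (((start + j : Nat) : Int) + 1))
      :: piecesOfB s fl (start + j + 1)
termination_by fl.length - start
decreasing_by
  obtain ⟨pre, suf, hfl, hlen, -⟩ := (PySem.List.index?_eq_some_iff _ true j).mp h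
  have : (fl.drop start).length = fl.length - start := List.length_drop ..
  rw [hfl] at this
  simp at this
  omega

-- the 'for x, y in zip(srt, srt[1:]): if x == y: return -1' scan
def adjDupB : List String → Bool
  | x :: y :: rest => if x == y then true else adjDupB (y :: rest)
  | _ => false

def split_count_alt (s : String) (flags : List Bool) : Int :=
  let pieces := piecesOfB s (PySem.List.slice flags none (some (PySem.Str.len s))) 0
  if adjDupB (PySem.List.sorted pieces (fun x => x) false) then -1
  else (pieces.length : Int)

-- ===== PRECONDITION & SPEC =====
def Spec_split_count (s : String) (flags : List Bool) (out : Int) : Prop := out = split_count_alt s flags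
instance (s : String) (flags : List Bool) (out : Int) : Decidable (Spec_split_count s flags out) := by unfold Spec_split_count; infer_instance

-- ===== CLAIM (what is proved, stated in full; the proofs are below) =====
def Claim_equal_split_count : Prop := ∀ (s : String) (flags : List Bool), Dom_split_count s flags → Spec_split_count s flags (split_count s flags)

-- ===== LEMMAS AND PROOFS =====

-- the list of completed pieces, as A's buffer loop produces them (proof-side spec)
def piecesS : List (Char × Bool) → String → List String
  | [], _ => []
  | (c, flag) :: rest, buf =>
    let buf' := buf.push c
    if flag then buf' :: piecesS rest "" else piecesS rest buf'

-- prefix the first piece with a pending buffer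
def addBuf (b : String) : List String → List String
  | [] => []
  | p :: ps => (b ++ p) :: ps

theorem nodup_append_singleton_iff {α : Type} (xs : List α) (x : α) :
    (xs ++ [x]).Nodup ↔ xs.Nodup ∧ x ∉ xs := by
  simp [List.nodup_append]
  intro _
  constructor
  · intro h hx; exact h x hx rfl
  · intro h a ha hax; exact h (hax ▸ ha)

-- |set(xs)| = |xs| exactly when xs has no duplicates
theorem length_ofList_eq_iff {α : Type} [BEq α] [LawfulBEq α] (xs : List α) :
    (PySem.Set.ofList xs).length = xs.length ↔ xs.Nodup := by
  induction xs using List.reverseRecOn with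
  | nil => simp [PySem.Set.ofList_nil]
  | append_singleton xs x ih =>
    rw [PySem.Set.ofList_append_singleton, nodup_append_singleton_iff]
    by_cases hx : x ∈ xs
    · have hmem : x ∈ PySem.Set.ofList xs := (PySem.Set.mem_ofList xs x).mpr hx
      rw [PySem.Set.add_of_mem hmem]
      have hle := PySem.Set.length_ofList_le (xs := xs)
      simp only [List.length_append, List.length_cons, List.length_nil]
      constructor
      · intro h; omega
      · intro h; exact absurd hx h.2
    · have hmem : x ∉ PySem.Set.ofList xs := fun h' => hx ((PySem.Set.mem_ofList xs x).mp h')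
      rw [PySem.Set.add_of_not_mem hmem]
      simp only [List.length_append, List.length_cons, List.length_nil]
      constructor
      · intro h; exact ⟨ih.mp (by omega), hx⟩
      · intro h; have := ih.mpr h.1; omega

-- A's loop returns -1 exactly when the accumulated pieces repeat
theorem loopA_eq (l : List (Char × Bool)) :
    ∀ (acc : PySem.Set String) (buf : String), acc.Nodup →
      splitALoop l acc buf =
        (if (PySem.Set.ofList (acc ++ piecesS l buf)).length ≠ (acc ++ piecesS l buf).length
         then -1 else ((acc ++ piecesS l buf).length : Int)) := by
  induction l with
  | nil =>
    intro acc buf h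
    simp [splitALoop, piecesS, PySem.Set.ofList_eq_self_of_nodup acc h]
  | cons p rest ih =>
    obtain ⟨c, flag⟩ := p
    intro acc buf h
    cases flag with
    | false =>
      simpa only [splitALoop, piecesS, Bool.false_eq_true, if_false] using ih acc (buf.push c) h
    | true =>
      by_cases hmem : buf.push c ∈ acc
      · have hcontains : PySem.Set.contains acc (buf.push c) = true :=
          (PySem.Set.contains_iff acc (buf.push c)).mpr hmem
        simp only [splitALoop, piecesS, hcontains, if_true]
        have hnd : ¬ (acc ++ (buf.push c) :: piecesS rest "").Nodup := by
          intro hh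
          exact (List.nodup_append.mp hh).2.2 (buf.push c) hmem (buf.push c) (by simp) rfl
        rw [if_pos ((length_ofList_eq_iff (acc ++ (buf.push c) :: piecesS rest "")).not.mpr hnd)]
      · have hcontains : PySem.Set.contains acc (buf.push c) = false := by
          rw [Bool.eq_false_iff]
          exact fun hc => hmem ((PySem.Set.contains_iff acc (buf.push c)).mp hc)
        have hadd := PySem.Set.add_of_not_mem (s := acc) hmem
        have hnd : (acc ++ [buf.push c]).Nodup :=
          (nodup_append_singleton_iff acc (buf.push c)).mpr ⟨h, hmem⟩
        have hih := ih (acc ++ [buf.push c]) "" hnd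
        simp only [splitALoop, piecesS, hcontains, Bool.false_eq_true, if_false, if_true, hadd]
        simpa only [List.append_assoc, List.singleton_append] using hih

-- zip truncates its second list to the length of the first
theorem zip_take_self {α β : Type} (cs : List α) (fl : List β) :
    cs.zip fl = cs.zip (fl.take cs.length) := by
  induction cs generalizing fl with
  | nil => simp
  | cons c cs ih =>
    cases fl with
    | nil => simp
    | cons f fl => simp [List.zip_cons_cons, ih fl]

-- no True flag: the buffer never completes, no pieces
theorem piecesS_no_true (fl : List Bool) :
    ∀ (cs : List Char) (buf : String), true ∉ fl → piecesS (cs.zip fl) buf = [] := by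
  induction fl with
  | nil => intro cs buf _; cases cs <;> simp [piecesS]
  | cons f fl ih =>
    intro cs buf h
    cases cs with
    | nil => simp [piecesS]
    | cons c cs =>
      have hf : f = false := by
        cases f
        · rfl
        · exact absurd (List.mem_cons_self) h
      subst hf
      simp only [List.zip_cons_cons, piecesS, Bool.false_eq_true, if_false]
      exact ih cs (buf.push c) (fun hm => h (List.mem_cons_of_mem _ hm))

-- consuming a False prefix up to the first True flag completes exactly one piece
theorem piecesS_prefix (pre : List Bool) (suf : List Bool) :
    ∀ (cs : List Char) (buf : String), true ∉ pre → pre.length < cs.length →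
      piecesS (cs.zip (pre ++ true :: suf)) buf =
        (buf ++ String.ofList (cs.take (pre.length + 1)))
          :: piecesS ((cs.drop (pre.length + 1)).zip suf) "" := by
  induction pre with
  | nil =>
    intro cs buf _ hlen
    cases cs with
    | nil => simp at hlen
    | cons c cs =>
      simp only [List.nil_append, List.zip_cons_cons, piecesS, if_true, List.length_nil,
        List.take_succ_cons, List.take_zero, List.drop_succ_cons, List.drop_zero]
      have : buf.push c = buf ++ String.ofList [c] := by
        rw [← String.toList_inj]
        simp [String.toList_append, String.toList_push, String.toList_ofList]
      rw [this]
  | cons f pre ih =>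
    intro cs buf hmem hlen
    have hf : f = false := by
      cases f
      · rfl
      · exact absurd (List.mem_cons_self) hmem
    subst hf
    cases cs with
    | nil => simp at hlen
    | cons c cs =>
      simp only [List.cons_append, List.zip_cons_cons, piecesS, Bool.false_eq_true, if_false]
      rw [ih cs (buf.push c) (fun hm => hmem (List.mem_cons_of_mem _ hm))
        (by simpa using Nat.lt_of_succ_lt_succ (by simpa using hlen))]
      have hstr : buf.push c ++ String.ofList (cs.take (pre.length + 1)) =
          buf ++ String.ofList (c :: cs.take (pre.length + 1)) := by
        rw [← String.toList_inj]
        simp [String.toList_append, String.toList_push, String.toList_ofList]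
      simp only [List.length_cons, List.take_succ_cons, List.drop_succ_cons, hstr]

-- B's cursor recursion produces exactly A's buffer pieces (buffer prefixed to the first piece)
theorem piecesOfB_eq (n : Nat) :
    ∀ (start : Nat) (fl : List Bool) (s : String) (buf : String),
      fl.length - start = n → fl.length ≤ s.toList.length →
      piecesS ((s.toList.drop start).zip (fl.drop start)) buf =
        addBuf buf (piecesOfB s fl start) := by
  induction n using Nat.strong_induction_on with
  | _ n ih =>
    intro start fl s buf hn hle
    rw [piecesOfB]
    split
    · next hidx =>
      have : true ∉ fl.drop start := (PySem.List.index?_eq_none_iff _ true).mp hidx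
      simp [piecesS_no_true (fl.drop start) (s.toList.drop start) buf this, addBuf]
    · next j hidx =>
      obtain ⟨pre, suf, hfl, hklen, hpre⟩ := (PySem.List.index?_eq_some_iff _ true j).mp hidx
      subst hklen
      have hdlen : (fl.drop start).length = fl.length - start := List.length_drop ..
      have hstruct : pre.length + 1 + suf.length = fl.length - start := by
        rw [hfl] at hdlen; simp at hdlen; omega
      have hstart : start + pre.length < fl.length := by omega
      have hcs : pre.length < (s.toList.drop start).length := by
        rw [List.length_drop]; omega
      rw [hfl, piecesS_prefix pre suf (s.toList.drop start) buf hpre hcs]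
      -- the head piece: s[start : start+pre.length+1] is take (pre.length+1) of drop start
      have hcast : (((start + pre.length : Nat) : Int) + 1) =
          ((start + pre.length + 1 : Nat) : Int) := by push_cast; ring
      have hbridge : (PySem.Str.slice s (some ((start : Nat) : Int))
            (some (((start + pre.length : Nat) : Int) + 1))).toList =
          PySem.List.slice s.toList (some ((start : Nat) : Int))
            (some (((start + pre.length : Nat) : Int) + 1)) := by
        simp [PySem.Str.slice]
      have hslice_head : PySem.Str.slice s (some ((start : Nat) : Int))
            (some (((start + pre.length : Nat) : Int) + 1)) =
          String.ofList ((s.toList.drop start).take (pre.length + 1)) := by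
        rw [← String.toList_inj, String.toList_ofList, hbridge, hcast,
          PySem.List.slice_natCast]
        congr 1
        omega
      -- the tail: cursor moves to start + pre.length + 1
      have hdrop_cs : (s.toList.drop start).drop (pre.length + 1) =
          s.toList.drop (start + pre.length + 1) := by
        rw [List.drop_drop, show start + (pre.length + 1) = start + pre.length + 1 from by omega]
      have hdrop_fl : fl.drop (start + pre.length + 1) = suf := by
        have h1 : (fl.drop start).drop (pre.length + 1) = suf := by
          rw [hfl, List.append_cons, List.drop_left' (by simp)]
        rw [List.drop_drop] at h1
        rw [show start + pre.length + 1 = start + (pre.length + 1) from by omega, h1]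
      have hrest := ih (fl.length - (start + pre.length + 1)) (by omega)
        (start + pre.length + 1) fl s "" rfl hle
      rw [hdrop_fl] at hrest
      rw [hdrop_cs, hrest]
      have hempty : addBuf "" (piecesOfB s fl (start + pre.length + 1)) =
          piecesOfB s fl (start + pre.length + 1) := by
        cases hp : piecesOfB s fl (start + pre.length + 1) with
        | nil => simp [addBuf]
        | cons p ps =>
          have hp0 : "" ++ p = p := by
            rw [← String.toList_inj]; simp
          simp [addBuf, hp0]
      rw [hempty, hslice_head]
      simp [addBuf]

-- the adjacent scan finds nothing iff neighbours are pairwise distinct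
theorem adjDupB_eq_false_iff (l : List String) :
    adjDupB l = false ↔ l.IsChain (· ≠ ·) := by
  induction l with
  | nil => simp [adjDupB]
  | cons x l ih =>
    cases l with
    | nil => simp [adjDupB]
    | cons y l =>
      rw [List.isChain_cons_cons, ← ih]
      constructor
      · intro h
        simp only [adjDupB] at h
        by_cases hxy : x = y
        · simp [hxy] at h
        · constructor
          · exact hxy
          · simpa [hxy] using h
      · intro ⟨hne, hrest⟩
        simp [adjDupB, hne, hrest]

-- adjacent ≤ plus adjacent ≠ gives adjacent <
theorem isChain_lt_of_le_ne (l : List String)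
    (hle : l.IsChain (· ≤ ·)) (hne : l.IsChain (· ≠ ·)) : l.IsChain (· < ·) := by
  induction l with
  | nil => exact List.isChain_nil
  | cons x l ih =>
    cases l with
    | nil => exact List.isChain_singleton x
    | cons y l =>
      rw [List.isChain_cons_cons] at hle hne ⊢
      exact ⟨lt_of_le_of_ne hle.1 hne.1, ih hle.2 hne.2⟩

-- sort-then-scan detects a duplicate iff the pieces repeat
theorem adjDupB_sorted_iff (ps : List String) :
    adjDupB (PySem.List.sorted ps (fun x => x) false) = false ↔ ps.Nodup := by
  have hperm := PySem.List.sorted_perm ps (fun x => x) false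
  constructor
  · intro h
    have hchain_ne := (adjDupB_eq_false_iff _).mp h
    have hchain_le : (PySem.List.sorted ps (fun x => x) false).IsChain (· ≤ ·) :=
      (PySem.List.sorted_pairwise ps (fun x => x)).isChain
    have hlt := (isChain_lt_of_le_ne _ hchain_le hchain_ne).pairwise
    exact hperm.nodup_iff.mp (hlt.imp ne_of_lt)
  · intro h
    have : (PySem.List.sorted ps (fun x => x) false).Nodup := hperm.nodup_iff.mpr h
    exact (adjDupB_eq_false_iff _).mpr this.isChain

-- ===== VERDICT (by name: the statement is the Claim_ definition above) =====
theorem split_count_spec : Claim_equal_split_count := by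
  intro s flags _
  unfold Spec_split_count split_count split_count_alt
  have htrunc : PySem.List.slice flags none (some (PySem.Str.len s)) =
      flags.take s.toList.length := by
    rw [PySem.Str.len_eq, PySem.List.slice_to_natCast]
  set fl := flags.take s.toList.length with hfl
  have hzip : s.toList.zip flags = s.toList.zip fl := zip_take_self s.toList flags
  have hps := piecesOfB_eq fl.length 0 fl s "" (by omega) (by simp [hfl])
  simp only [List.drop_zero] at hps
  have haddbuf : addBuf "" (piecesOfB s fl 0) = piecesOfB s fl 0 := by
    cases hp : piecesOfB s fl 0 with
    | nil => simp [addBuf]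
    | cons p ps =>
      have hp0 : "" ++ p = p := by
        rw [← String.toList_inj]; simp
      simp [addBuf, hp0]
  rw [haddbuf] at hps
  have hA := loopA_eq (s.toList.zip flags) PySem.Set.empty "" (by simp [PySem.Set.empty])
  rw [hzip, hps] at hA
  rw [hzip, hA]
  simp only [htrunc]
  set ps := piecesOfB s fl 0 with hpsdef
  simp only [PySem.Set.empty, List.nil_append]
  by_cases hnd : ps.Nodup
  · have h1 : ¬ (PySem.Set.ofList ps).length ≠ ps.length := by
      exact fun hne => hne ((length_ofList_eq_iff ps).mpr hnd)
    have h2 : adjDupB (PySem.List.sorted ps (fun x => x) false) = false :=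
      (adjDupB_sorted_iff ps).mpr hnd
    rw [if_neg h1]
    simp [h2]
  · have h1 : (PySem.Set.ofList ps).length ≠ ps.length := by
      rw [Ne, length_ofList_eq_iff]; exact hnd
    have h2 : adjDupB (PySem.List.sorted ps (fun x => x) false) = true := by
      rcases Bool.eq_false_or_eq_true (adjDupB (PySem.List.sorted ps (fun x => x) false)) with h | h
      · exact h
      · exact absurd ((adjDupB_sorted_iff ps).mp h) hnd
    rw [if_pos h1]
    simp [h2]
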